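-- pv_equiv track=rewrite | github.com/nshaibu/Algorithms | python/substr_with_vowels.py | solution
-- ===== SOURCE A (Python) =====
-- vowels = ["a", "e", "i", "o", "u"]
--
-- def solution(text: str) -> int:
--     count = 0
--     num_groups = len(text) // 3
--     start = 0
--
--     for _ in range(num_groups):
--         end = start + 3
--         sub_str = text[start:end]
--         num = len([ch for ch in sub_str if ch in vowels])
--         if num == 2:
--             count += 1
--         start = end
--     return count
-- ===== SOURCE B (Python) =====
-- def solution(text: str) -> int:
--     # Staged approach: build a vowel prefix-sum array, then count the block
--     # boundaries i = 0, 3, 6, ... whose prefix difference is exactly 2.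
--     pref = [0]
--     for ch in text:
--         pref.append(pref[-1] + (ch in "aeiou"))
--     return sum(1 for i in range(0, len(text) - 2, 3) if pref[i + 3] - pref[i] == 2)
-- ===== Notes on version B (the rewrite author's own statement) =====
-- stated objective: faster
-- what changed: B is a staged two-pass algorithm: it first builds a vowel prefix-sum array over the whole string, then counts block starts i in range(0, len-2, 3) whose prefix difference pref[i+3]-pref[i] equals 2, instead of A's single loop that slices out each 3-character group and filters it with a list comprehension; constant factor: no per-group slice/comprehension list objects.
import Mathlib
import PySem

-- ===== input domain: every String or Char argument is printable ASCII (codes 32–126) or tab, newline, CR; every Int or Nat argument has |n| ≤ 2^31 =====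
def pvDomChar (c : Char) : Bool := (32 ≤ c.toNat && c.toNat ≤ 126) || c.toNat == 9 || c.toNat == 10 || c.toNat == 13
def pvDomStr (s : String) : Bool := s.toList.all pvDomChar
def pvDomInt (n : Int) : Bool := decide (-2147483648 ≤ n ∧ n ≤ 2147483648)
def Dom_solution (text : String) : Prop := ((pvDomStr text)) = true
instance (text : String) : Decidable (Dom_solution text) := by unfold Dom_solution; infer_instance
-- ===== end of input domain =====

-- B replaces A's slice-each-group loop by a staged two-pass algorithm (vowel
-- prefix-sum array, then a count over block starts); same values everywhere
-- (measured constant-factor faster: no per-group slice/comprehension lists).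

-- ===== PORT A =====
def vowelsA : List Char := ['a', 'e', 'i', 'o', 'u']

-- the for-loop over range(num_groups) with state (start, count)
def aGo (l : List Char) : Nat → Nat → Int → Int
  | 0, _, count => count
  | g + 1, start, count =>
    let sub := PySem.List.slice l (some (start : Int)) (some ((start : Int) + 3))
    let num := (sub.filter (fun ch => vowelsA.contains ch)).length
    aGo l g (start + 3) (if num = 2 then count + 1 else count)

def solution (text : String) : Int :=
  let l := text.toList
  aGo l (l.length / 3) 0 0

-- ===== PORT B =====
-- the 'for ch in text: pref.append(pref[-1] + (ch in "aeiou"))' loop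
def bPref (acc : List Int) : List Char → List Int
  | [] => acc
  | ch :: rest =>
    bPref (acc ++ [(PySem.List.pyGet? acc (-1)).getD 0
                    + (if ("aeiou".toList).contains ch then 1 else 0)]) rest

def solution_alt (text : String) : Int :=
  let l := text.toList
  let pref := bPref [0] l
  -- pref[i+3] and pref[i]: both indices are in range for every i the range yields,
  -- so the .getD 0 default is never taken
  (PySem.List.pyRange 0 ((l.length : Int) - 2) 3).foldl
    (fun acc i =>
      if (PySem.List.pyGet? pref (i + 3)).getD 0 - (PySem.List.pyGet? pref i).getD 0 = 2
      then acc + 1 else acc) 0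

-- ===== PRECONDITION & SPEC =====
def Spec_solution (text : String) (out : Int) : Prop := out = solution_alt text
instance (text : String) (out : Int) : Decidable (Spec_solution text out) := by unfold Spec_solution; infer_instance

-- ===== CLAIM (what is proved, stated in full; the proofs are below) =====
def Claim_equal_solution : Prop := ∀ (text : String), Dom_solution text → Spec_solution text (solution text)

-- ===== LEMMAS AND PROOFS =====

-- number of vowels in a character list, as an Int
def VC (l : List Char) : Int := ((l.filter (fun ch => ("aeiou".toList).contains ch)).length : Int)

lemma VC_nil : VC [] = 0 := rfl

lemma VC_cons (ch : Char) (t : List Char) :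
    VC (ch :: t) = (if ("aeiou".toList).contains ch then 1 else 0) + VC t := by
  simp only [VC, List.filter_cons]
  by_cases h : ("aeiou".toList).contains ch = true
  · rw [if_pos h, if_pos h, List.length_cons]; push_cast; ring
  · rw [if_neg h, if_neg h]; ring

lemma VC_append (a b : List Char) : VC (a ++ b) = VC a + VC b := by
  simp [VC]

-- the prefix loop builds exactly the running vowel counts
lemma bPref_spec : ∀ (l : List Char) (acc : List Int) (a : Int),
    bPref (acc ++ [a]) l
      = (acc ++ [a]) ++ (List.range l.length).map (fun i => a + VC (l.take (i + 1))) := by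
  intro l
  induction l with
  | nil => intro acc a; simp [bPref]
  | cons ch rest ih =>
    intro acc a
    rw [bPref, PySem.List.pyGet?_neg_one, List.getLast?_concat]
    rw [show (Option.some a).getD 0 = a from rfl]
    rw [ih ((acc ++ [a])) (a + (if ("aeiou".toList).contains ch then 1 else 0))]
    have hmap : (List.range ((ch :: rest).length)).map
          (fun i => a + VC ((ch :: rest).take (i + 1)))
        = (a + (if ("aeiou".toList).contains ch then 1 else 0))
            :: (List.range rest.length).map
                (fun i => (a + (if ("aeiou".toList).contains ch then 1 else 0))
                  + VC (rest.take (i + 1))) := by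
      rw [List.length_cons, List.range_succ_eq_map, List.map_cons, List.map_map]
      congr 1
      · rw [show (ch :: rest).take (0 + 1) = [ch] by simp, VC_cons, VC_nil]; ring
      · apply List.map_congr_left
        intro i _
        simp only [Function.comp]
        rw [show (ch :: rest).take (Nat.succ i + 1) = ch :: rest.take (i + 1) by simp, VC_cons]
        ring
    rw [hmap]
    simp [List.append_assoc]

lemma bPref_zero (l : List Char) :
    bPref [0] l = 0 :: (List.range l.length).map (fun i => VC (l.take (i + 1))) := by
  have := bPref_spec l [] 0
  simpa using this

-- pref[i] is the vowel count of the first i characters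
lemma pref_get (l : List Char) (i : Nat) (hi : i ≤ l.length) :
    (PySem.List.pyGet? (bPref [0] l) ((i : Nat) : Int)).getD 0 = VC (l.take i) := by
  rw [PySem.List.pyGet?_natCast, bPref_zero]
  cases i with
  | zero => simp [VC_nil]
  | succ j =>
    have hj : j < l.length := by omega
    simp [hj]

-- A's loop counts, over the k-th groups, the 3-character windows with exactly two vowels
lemma aGo_spec (l : List Char) : ∀ (g start : Nat) (count : Int),
    aGo l g start count
      = (List.range g).foldl
          (fun acc k => if VC ((l.drop (start + 3 * k)).take 3) = 2 then acc + 1 else acc)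
          count := by
  intro g
  induction g with
  | zero => intro start count; simp [aGo]
  | succ g ih =>
    intro start count
    rw [aGo]
    have hslice : PySem.List.slice l (some (start : Int)) (some ((start : Int) + 3))
        = (l.drop start).take 3 := by
      have h3 : ((start : Int) + 3) = ((start : Int) + ((3 : Nat) : Int)) := by norm_num
      rw [h3, PySem.List.slice_natCast_add]
    simp only [hslice]
    rw [ih]
    rw [List.range_succ_eq_map, List.foldl_cons, List.foldl_map]
    have hcond : (((l.drop start).take 3).filter (fun ch => vowelsA.contains ch)).length = 2
        ↔ VC ((l.drop (start + 3 * 0)).take 3) = 2 := by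
      have hv : (fun ch => vowelsA.contains ch) = (fun ch => ("aeiou".toList).contains ch) := by
        funext ch; congr 1
      simp only [Nat.mul_zero, Nat.add_zero, VC, hv]
      exact_mod_cast Iff.rfl
    rw [if_congr hcond rfl rfl]
    apply PySem.List.foldl_congr_mem
    intro acc k _
    have : start + 3 * Nat.succ k = (start + 3) + 3 * k := by omega
    rw [this]

-- the B-side block-start range is exactly the first len/3 multiples of 3
lemma range_eq (len : Nat) :
    PySem.List.pyRange 0 ((len : Int) - 2) 3
      = (List.range (len / 3)).map (fun k => ((3 * k : Nat) : Int)) := by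
  rw [PySem.List.pyRange_of_pos 0 ((len : Int) - 2) (by norm_num)]
  have hn : (if (0 : Int) < (len : Int) - 2 then ((((len : Int) - 2) - 0 + 3 - 1) / 3).toNat else 0)
      = len / 3 := by
    split_ifs with h
    · omega
    · omega
  rw [hn]
  apply List.map_congr_left
  intro k _
  push_cast
  ring

-- ===== VERDICT (by name: the statement is the Claim_ definition above) =====
theorem solution_spec : Claim_equal_solution := by
  intro text _
  unfold Spec_solution
  have hA : solution text = aGo text.toList (text.toList.length / 3) 0 0 := rfl
  have hB : solution_alt text
      = (PySem.List.pyRange 0 ((text.toList.length : Int) - 2) 3).foldl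
          (fun acc i =>
            if (PySem.List.pyGet? (bPref [0] text.toList) (i + 3)).getD 0
                - (PySem.List.pyGet? (bPref [0] text.toList) i).getD 0 = 2
            then acc + 1 else acc) 0 := rfl
  rw [hA, hB, aGo_spec, range_eq, List.foldl_map]
  set l := text.toList with hl
  have hdm := Nat.div_add_mod l.length 3
  apply PySem.List.foldl_congr_mem
  intro acc k hk
  have hk3 : 3 * k + 3 ≤ l.length := by
    have := List.mem_range.mp hk
    omega
  have h1 : ((3 * k : Nat) : Int) + 3 = (((3 * k + 3 : Nat)) : Int) := by push_cast; ring
  rw [h1, pref_get l (3 * k + 3) (by omega), pref_get l (3 * k) (by omega)]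
  rw [show l.take (3 * k + 3) = l.take (3 * k) ++ (l.drop (3 * k)).take 3 from List.take_add,
      VC_append]
  rw [show VC (l.take (3 * k)) + VC ((l.drop (3 * k)).take 3) - VC (l.take (3 * k))
        = VC ((l.drop (3 * k)).take 3) by ring]
  rw [Nat.zero_add]
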